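-- pv_equiv track=rewrite | github.com/blakedehaas/Timesheet-Calculator | config.py | _resolve_pto_distribution
-- ===== SOURCE A (Python) =====
-- def _resolve_pto_distribution(projects_dict, pto_dist):
--     """
--     If pto_dist is falsy (None or {}), return an equal distribution among projects (summing to 100).
--     Otherwise return pto_dist unchanged.
--     """
--     if not pto_dist:
--         n = len(projects_dict)
--         if n == 0:
--             return {}
--         base = 100 // n
--         remainder = 100 - base * n
--         projects_list = list(projects_dict.keys())
--         eq = {p: base for p in projects_list}
--         # Distribute the remaining 1% chunks to the first 'remainder' projects
--         for i in range(remainder):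
--             eq[projects_list[i]] += 1
--         return eq
--     return pto_dist
-- ===== SOURCE B (Python) =====
-- def _resolve_pto_distribution(projects_dict, pto_dist):
--     """
--     If pto_dist is falsy (None or {}), return an equal distribution among projects (summing to 100).
--     Otherwise return pto_dist unchanged.
--     """
--     if pto_dist:
--         return pto_dist
--     # Greedy largest-remainder: give each project the ceiling of the still-undistributed
--     # amount divided by the number of projects still to serve; the extra 1% chunks land
--     # on the first projects automatically, no base/remainder bookkeeping needed.
--     eq = {}
--     remaining = 100
--     k = len(projects_dict)
--     for p in projects_dict:
--         share = -(-remaining // k)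
--         eq[p] = share
--         remaining -= share
--         k -= 1
--     return eq
-- ===== Notes on version B (the rewrite author's own statement) =====
-- stated objective: alternative
-- what changed: Replaces the base-plus-remainder computation (100//n to every key, then a second indexed pass adding 1 to the first remainder keys) with a single greedy largest-remainder pass that gives each project the ceiling of the still-undistributed amount over the projects left, so base/remainder and the index loop disappear.
import Mathlib
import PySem

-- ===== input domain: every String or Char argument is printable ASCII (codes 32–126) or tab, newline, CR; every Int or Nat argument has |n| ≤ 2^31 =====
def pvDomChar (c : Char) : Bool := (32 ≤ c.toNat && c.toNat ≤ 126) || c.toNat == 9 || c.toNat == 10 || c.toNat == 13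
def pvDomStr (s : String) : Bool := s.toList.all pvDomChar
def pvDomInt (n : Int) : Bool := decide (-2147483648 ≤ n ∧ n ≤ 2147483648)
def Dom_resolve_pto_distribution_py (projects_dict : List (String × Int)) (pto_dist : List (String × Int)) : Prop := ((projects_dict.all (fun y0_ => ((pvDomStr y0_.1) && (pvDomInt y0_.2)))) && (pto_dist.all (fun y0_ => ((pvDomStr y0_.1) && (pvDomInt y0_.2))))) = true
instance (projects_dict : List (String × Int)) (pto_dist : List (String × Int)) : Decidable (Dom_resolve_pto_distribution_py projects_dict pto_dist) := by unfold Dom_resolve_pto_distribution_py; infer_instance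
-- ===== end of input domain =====

-- B replaces A's base/remainder two-pass construction by a single greedy largest-remainder
-- pass (each project gets the ceiling of the remaining amount over the projects left);
-- same cost, different decomposition ("alternative").


-- ===== PORT A =====
def resolve_pto_distribution_py (projects_dict : List (String × Int)) (pto_dist : List (String × Int)) : List (String × Int) :=
  if pto_dist.isEmpty then
    let n : Int := projects_dict.length
    if n = 0 then []
    else
      let base := PySem.Int.floordiv 100 n
      let remainder := 100 - base * n
      let projects_list := projects_dict.map Prod.fst
      let eq0 : PySem.Dict String Int :=
        projects_list.foldl (fun d p => d.insert p base) PySem.Dict.empty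
      -- for i in range(remainder): eq[projects_list[i]] += 1
      -- (i < remainder ≤ n always indexes in range, so the 'none' arm is unreachable)
      let eq1 := (PySem.List.pyRange 0 remainder).foldl
        (fun d i => match PySem.List.pyGet? projects_list i with
          | some p => d.modify p 0 (· + 1)
          | none => d) eq0
      eq1.items
  else pto_dist

-- ===== PORT B =====
-- greedy loop: for p in projects_dict: share = -(-remaining // k); eq[p] = share; remaining -= share; k -= 1
def pvGreedy : List String → Int → Int → PySem.Dict String Int → PySem.Dict String Int
  | [], _, _, d => d
  | p :: rest, remaining, k, d =>
      let share := -(PySem.Int.floordiv (-remaining) k)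
      pvGreedy rest (remaining - share) (k - 1) (d.insert p share)

def resolve_pto_distribution_py_alt (projects_dict : List (String × Int)) (pto_dist : List (String × Int)) : List (String × Int) :=
  if pto_dist.isEmpty then
    (pvGreedy (projects_dict.map Prod.fst) 100 (projects_dict.length : Int) PySem.Dict.empty).items
  else pto_dist

-- ===== PRECONDITION & SPEC =====
-- Pre_ excludes association lists whose projects_dict part has duplicate keys: such lists do not
-- represent any Python dict argument (the Python function only ever receives dicts, whose keys are unique).
def Pre_resolve_pto_distribution_py (projects_dict : List (String × Int)) (pto_dist : List (String × Int)) : Prop :=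
  (projects_dict.map Prod.fst).Nodup
instance (projects_dict : List (String × Int)) (pto_dist : List (String × Int)) : Decidable (Pre_resolve_pto_distribution_py projects_dict pto_dist) := by unfold Pre_resolve_pto_distribution_py; infer_instance

def pvWitness_resolve_pto_distribution_py : (List (String × Int)) × (List (String × Int)) :=
  ([("a", 1), ("b", 2), ("c", 3)], [])

def Spec_resolve_pto_distribution_py (projects_dict : List (String × Int)) (pto_dist : List (String × Int)) (out : List (String × Int)) : Prop := out = resolve_pto_distribution_py_alt projects_dict pto_dist
instance (projects_dict : List (String × Int)) (pto_dist : List (String × Int)) (out : List (String × Int)) : Decidable (Spec_resolve_pto_distribution_py projects_dict pto_dist out) := by unfold Spec_resolve_pto_distribution_py; infer_instance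

-- ===== CLAIM (what is proved, stated in full; the proofs are below) =====
def Claim_equal_resolve_pto_distribution_py : Prop := ∀ (projects_dict : List (String × Int)) (pto_dist : List (String × Int)), Dom_resolve_pto_distribution_py projects_dict pto_dist → Pre_resolve_pto_distribution_py projects_dict pto_dist → Spec_resolve_pto_distribution_py projects_dict pto_dist (resolve_pto_distribution_py projects_dict pto_dist)


-- ===== LEMMAS AND PROOFS =====

def pvTarget : List String → Int → Int → List (String × Int)
  | [], _, _ => []
  | p :: rest, base, r =>
      (p, base + if 0 < r then 1 else 0) :: pvTarget rest base (r - if 0 < r then 1 else 0)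

theorem pvGreedy_items (ks : List String) (base r : Int) (d : PySem.Dict String Int)
    (hnd : ks.Nodup) (hfresh : ∀ p ∈ ks, d.contains p = false)
    (hr0 : 0 ≤ r) (hrn : r ≤ (ks.length : Int)) :
    (pvGreedy ks (base * ks.length + r) (ks.length : Int) d).items
      = d.items ++ pvTarget ks base r := by
  induction ks generalizing base r d with
  | nil => simp [pvGreedy, pvTarget]
  | cons p rest ih =>
    have hlen : ((p :: rest).length : Int) = (rest.length : Int) + 1 := by
      simp
    have hnpos : (0:Int) < ((p :: rest).length : Int) := by
      simp
    set c : Int := if 0 < r then 1 else 0 with hc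
    have hshare : -(PySem.Int.floordiv (-(base * (p :: rest).length + r)) ((p :: rest).length : Int)) = base + c := by
      rw [PySem.Int.neg_floordiv_neg_eq_iff_of_pos hnpos]
      by_cases h : 0 < r
      · simp only [hc, if_pos h]
        constructor <;> nlinarith
      · simp only [hc, if_neg h]
        constructor <;> nlinarith
    rw [pvGreedy]
    simp only [hshare]
    have harg : base * ((p :: rest).length : Int) + r - (base + c) = base * rest.length + (r - c) := by
      rw [hlen]; ring
    have hk : ((p :: rest).length : Int) - 1 = (rest.length : Int) := by rw [hlen]; ring
    rw [harg, hk]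
    have hnd' := (List.nodup_cons.mp hnd).2
    have hpnot := (List.nodup_cons.mp hnd).1
    have hfresh' : ∀ q ∈ rest, (d.insert p (base + c)).contains q = false := by
      intro q hq
      rw [PySem.Dict.contains_insert]
      have : q ≠ p := fun h => hpnot (h ▸ hq)
      simp [this, hfresh q (List.mem_cons_of_mem _ hq)]
    have hr0' : 0 ≤ r - c := by by_cases h : 0 < r <;> simp [hc, h] <;> omega
    have hrn' : r - c ≤ (rest.length : Int) := by
      rw [hlen] at hrn
      by_cases h : 0 < r <;> simp [hc, h] <;> omega
    rw [ih (base) (r - c) _ hnd' hfresh' hr0' hrn']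
    rw [PySem.Dict.items_insert_of_not_contains _ _ (hfresh p (List.mem_cons_self))]
    simp [pvTarget, hc]

theorem pvMap_count_take (ks : List String) (base r : Int)
    (hnd : ks.Nodup) (hr0 : 0 ≤ r) (hrn : r ≤ (ks.length : Int)) :
    ks.map (fun p => (p, base + ((ks.take r.toNat).count p : Int))) = pvTarget ks base r := by
  induction ks generalizing r with
  | nil => simp [pvTarget]
  | cons p rest ih =>
    have hpnot := (List.nodup_cons.mp hnd).1
    have hnd' := (List.nodup_cons.mp hnd).2
    by_cases h : 0 < r
    · have htk : (p :: rest).take r.toNat = p :: rest.take (r.toNat - 1) := by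
        have : r.toNat = (r.toNat - 1) + 1 := by omega
        rw [this]; rfl
      have hr1 : (r - 1).toNat = r.toNat - 1 := by omega
      rw [pvTarget, if_pos h, htk]
      simp only [List.map_cons, List.cons.injEq]
      constructor
      · -- head
        have hcnt : (rest.take (r.toNat - 1)).count p = 0 := by
          have := List.Sublist.count_le p (List.take_sublist (r.toNat - 1) rest)
          have h0 : rest.count p = 0 := List.count_eq_zero_of_not_mem hpnot
          omega
        simp [List.count_cons_self, hcnt]
      · rw [← ih hnd' (r := r - 1) (by omega) (by simp at hrn ⊢; omega), ← hr1]
        apply List.map_congr_left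
        intro q hq
        have hqp : q ≠ p := fun hh => hpnot (hh ▸ hq)
        simp [Ne.symm hqp]
    · have hr : r = 0 := by omega
      subst hr
      rw [pvTarget, if_neg h]
      simp only [Int.toNat_zero, List.take_zero, List.count_nil, sub_zero,
        List.map_cons, List.cons.injEq]
      constructor
      · simp
      · rw [← ih hnd' (r := 0) le_rfl (by positivity)]
        simp


theorem pv_pyGet?_eq_some (xs : List String) (i : Int) (h0 : 0 ≤ i) (h : i < (xs.length : Int)) :
    PySem.List.pyGet? xs i = some (PySem.List.pyGetD xs i "") := by
  simp only [PySem.List.pyGet?, PySem.List.pyGetD, PySem.List.pyIdx?, if_pos h0, if_pos h]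
  simp only [Option.bind_some, Option.getD]
  rw [List.getElem?_eq_getElem (by omega)]

theorem pv_map_range_getD (xs : List String) (m : Nat) (h : m ≤ xs.length) :
    (List.range m).map (fun j => xs.getD j "") = xs.take m := by
  apply List.ext_getElem
  · simp [h]
  · intro i h1 h2
    simp only [List.getElem_map, List.getElem_range, List.getElem_take]
    have h1' : i < m := by simpa using h1
    rw [List.getD_eq_getElem?_getD, List.getElem?_eq_getElem (by omega)]
    simp

-- ===== VERDICT (by name: the statement is the Claim_ definition above) =====
theorem resolve_pto_distribution_py_spec : Claim_equal_resolve_pto_distribution_py := by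
  intro pd ptd _ hpre
  unfold Pre_resolve_pto_distribution_py at hpre
  unfold Spec_resolve_pto_distribution_py
  by_cases hptd : ptd.isEmpty
  · cases pd with
    | nil =>
      simp [resolve_pto_distribution_py, resolve_pto_distribution_py_alt, hptd, pvGreedy,
        PySem.Dict.empty]
    | cons hd tl =>
      simp only [resolve_pto_distribution_py, resolve_pto_distribution_py_alt, hptd, if_true]
      rw [if_neg (by simp only [List.length_cons]; push_cast; omega : ¬ (((hd :: tl).length : Int) = 0))]
      set n : Int := ((hd :: tl).length : Int) with hn
      set base : Int := PySem.Int.floordiv 100 n with hbase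
      set r : Int := 100 - base * n with hr
      set ks : List String := (hd :: tl).map Prod.fst with hks
      have hnpos : (0 : Int) < n := by rw [hn]; simp
      have hlen : (ks.length : Int) = n := by rw [hks, hn]; simp
      have hfd : base * n ≤ 100 ∧ 100 < (base + 1) * n :=
        (PySem.Int.floordiv_eq_iff_of_pos hnpos).mp rfl
      have hr0 : 0 ≤ r := by rw [hr]; omega
      have hrn : r ≤ (ks.length : Int) := by rw [hr, hlen]; nlinarith [hfd.2]
      -- A side
      have hfresh : ∀ p ∈ ks, (PySem.Dict.empty : PySem.Dict String Int).contains p = false := by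
        intro p _; exact PySem.Dict.contains_empty p
      set eq0 : PySem.Dict String Int := ks.foldl (fun d p => d.insert p base) PySem.Dict.empty with heq0d
      have heq0 : eq0.items = ks.map (fun p => (p, base)) := by
        rw [heq0d, PySem.Dict.items_foldl_insert_fresh ks (fun p => p) (fun _ => base) _ hfresh
          (by simpa using hpre)]
        simp [PySem.Dict.empty]
      have hkeys0 : eq0.keys = ks := by
        show eq0.items.map Prod.fst = ks
        rw [heq0, List.map_map]
        simp [Function.comp_def]
      have hnd0 : eq0.keys.Nodup := by rw [hkeys0]; exact hpre
      -- rewrite the indexed loop as a fold of modify over ks.take r.toNat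
      have hstep1 : (PySem.List.pyRange 0 r).foldl
            (fun d i => match PySem.List.pyGet? ks i with
              | some p => d.modify p 0 (· + 1)
              | none => d) eq0
          = (PySem.List.pyRange 0 r).foldl
            (fun d i => d.modify (PySem.List.pyGetD ks i "") 0 (· + 1)) eq0 :=
        PySem.List.foldl_congr_mem _ _ _ _ (by
          intro acc i hi
          have hi' := PySem.List.mem_pyRange_one.mp hi
          rw [pv_pyGet?_eq_some ks i hi'.1 (by omega)])
      have hrcast : r = ((r.toNat : Nat) : Int) := by omega
      have hstep2 : (PySem.List.pyRange 0 r).foldl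
            (fun d i => d.modify (PySem.List.pyGetD ks i "") 0 (· + 1)) eq0
          = (ks.take r.toNat).foldl (fun d p => d.modify p 0 (· + 1)) eq0 := by
        rw [hrcast, PySem.List.pyRange_zero_natCast, List.foldl_map]
        rw [PySem.List.foldl_congr_mem _ _
          (fun (d : PySem.Dict String Int) (j : Nat) => d.modify (ks.getD j "") 0 (· + 1)) _
          (by intro acc j _; rw [PySem.List.pyGetD_natCast])]
        simp only [Int.toNat_natCast]
        rw [← pv_map_range_getD ks r.toNat (by omega), List.foldl_map]
      rw [hstep1, hstep2]
      set eq1 := (ks.take r.toNat).foldl (fun d p => d.modify p 0 (· + 1)) eq0 with heq1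
      have hkeys1 : eq1.keys = ks := by
        rw [heq1, PySem.Dict.keys_foldl_modify (f := fun _ _ v => v + 1), hkeys0,
          PySem.Set.update_eq_append_filter]
        have hfil : (PySem.Set.ofList (ks.take r.toNat)).filter (fun y => !(PySem.Set.contains ks y)) = [] := by
          rw [List.filter_eq_nil_iff]
          intro y hy
          have hyks : y ∈ ks := List.mem_of_mem_take ((PySem.Set.mem_ofList _ _).mp hy)
          simpa using hyks
        rw [hfil]; simp
      have hnd1 : eq1.keys.Nodup := by rw [hkeys1]; exact hpre
      have hval : ∀ p ∈ ks, eq1.getD p 0 = base + ((ks.take r.toNat).count p : Int) := by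
        intro p hp
        rw [heq1, PySem.Dict.getD_foldl_modify_add_one]
        have hg0 : eq0.getD p 0 = base := by
          apply PySem.Dict.getD_of_mem_items _ _ hnd0
          rw [heq0]
          exact List.mem_map.mpr ⟨p, hp, rfl⟩
        rw [hg0]
      rw [PySem.Dict.items_eq_map_keys eq1 hnd1 0, hkeys1]
      rw [List.map_congr_left (fun p hp => by rw [hval p hp])]
      rw [pvMap_count_take ks base r hpre hr0 hrn]
      -- B side
      have h100 : (100 : Int) = base * ks.length + r := by rw [hr, hlen]; ring
      rw [h100, ← hlen, pvGreedy_items ks base r PySem.Dict.empty hpre hfresh hr0 hrn]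
      rfl
  · simp [resolve_pto_distribution_py, resolve_pto_distribution_py_alt, hptd]
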